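-- pv_equiv track=rewrite | github.com/maeri18/first-years-codes | informatique/dst 2020 info l1.py | niveau_paren
-- ===== SOURCE A (Python) =====
-- def niveau_paren(s:str)->int:
--     """renvoie le niveau de parenthese de la chaine s"""
--     nbre:int=0
--     c:str
--     for c in s:
--         if c=='(':
--             nbre=nbre+1
--         elif c==')':
--             nbre=nbre-1
--     return nbre
-- ===== SOURCE B (Python) =====
-- def niveau_paren(s: str) -> int:
--     """renvoie le niveau de parenthese de la chaine s"""
--     return s.count('(') - s.count(')')
-- ===== Notes on version B (the rewrite author's own statement) =====
-- stated objective: idiomatic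
-- what changed: Replaced the single accumulator loop branching per character with two independent str.count passes subtracted: no running state, a stateless closed-form expression.
import Mathlib
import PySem

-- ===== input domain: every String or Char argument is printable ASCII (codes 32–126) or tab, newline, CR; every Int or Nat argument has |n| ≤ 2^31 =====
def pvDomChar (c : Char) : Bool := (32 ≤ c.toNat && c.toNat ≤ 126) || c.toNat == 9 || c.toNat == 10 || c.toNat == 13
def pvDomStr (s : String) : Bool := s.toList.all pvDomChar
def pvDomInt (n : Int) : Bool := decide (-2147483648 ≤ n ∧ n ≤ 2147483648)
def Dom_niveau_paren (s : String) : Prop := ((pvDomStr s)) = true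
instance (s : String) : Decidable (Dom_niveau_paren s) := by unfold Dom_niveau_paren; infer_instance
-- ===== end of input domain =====

-- B replaces A's single accumulator loop with two independent str.count passes subtracted (idiomatic closed form).

-- ===== PORT A =====
def niveau_paren (s : String) : Int :=
  s.toList.foldl
    (fun nbre c =>
      if c == '(' then nbre + 1
      else if c == ')' then nbre - 1
      else nbre) 0

-- ===== PORT B =====
def niveau_paren_alt (s : String) : Int :=
  (PySem.Str.count s "(" : Int) - (PySem.Str.count s ")" : Int)

-- ===== PRECONDITION & SPEC =====
def Spec_niveau_paren (s : String) (out : Int) : Prop := out = niveau_paren_alt s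
instance (s : String) (out : Int) : Decidable (Spec_niveau_paren s out) := by unfold Spec_niveau_paren; infer_instance

-- ===== CLAIM (what is proved, stated in full; the proofs are below) =====
def Claim_equal_niveau_paren : Prop := ∀ (s : String), Dom_niveau_paren s → Spec_niveau_paren s (niveau_paren s)

-- ===== LEMMAS AND PROOFS =====

/-- The non-overlapping substring-count scan, specialised to a one-character needle,
counts occurrences of that character. -/
theorem count_go_single (c : Char) :
    ∀ (l : List Char) (fuel : Nat) (acc : Nat), l.length ≤ fuel →
      PySem.Chars.count.go [c] fuel l acc = acc + l.count c := by
  intro l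
  induction l with
  | nil =>
      intro fuel acc _
      cases fuel <;> simp [PySem.Chars.count.go]
  | cons h t ih =>
      intro fuel acc hle
      cases fuel with
      | zero => simp at hle
      | succ n =>
          simp only [List.length_cons, Nat.succ_le_succ_iff] at hle
          by_cases hc : c = h
          · subst hc
            simp [PySem.Chars.count.go, List.isPrefixOf, ih n (acc + 1) hle]
            omega
          · simp [PySem.Chars.count.go, List.isPrefixOf, hc, ih n acc hle, Ne.symm hc]

theorem chars_count_single (l : List Char) (c : Char) :
    PySem.Chars.count l [c] = l.count c := by
  simp [PySem.Chars.count, count_go_single c l l.length 0 le_rfl]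

/-- A's loop computes opening-count minus closing-count, with the accumulator shifted. -/
theorem loopA (l : List Char) : ∀ (a : Int),
    l.foldl (fun nbre c => if c == '(' then nbre + 1 else if c == ')' then nbre - 1 else nbre) a
      = a + (l.count '(' : Int) - (l.count ')' : Int) := by
  induction l with
  | nil => intro a; simp
  | cons h t ih =>
      intro a
      rw [List.foldl_cons, ih]
      by_cases h1 : h = '('
      · subst h1
        simp
        ring
      · by_cases h2 : h = ')'
        · subst h2
          simp [h1]
          ring
        · simp [h1, h2]

-- ===== VERDICT (by name: the statement is the Claim_ definition above) =====
theorem niveau_paren_spec : Claim_equal_niveau_paren := by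
  intro s _
  unfold Spec_niveau_paren niveau_paren niveau_paren_alt
  rw [loopA]
  simp [PySem.Str.count_eq, chars_count_single]
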